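-- pv_equiv track=rewrite | github.com/imosudi/Creovue | app/models/seo.py | categorize_keywords
-- ===== SOURCE A (Python) =====
-- def categorize_keywords(keywords):
--     """
--     Categorise keywords by intent (informational, commercial, etc).
--
--     Args:
--         keywords (list): List of keywords to categorise
--
--     Returns:
--         dict: Categorised keywords
--     """
--     if not keywords:
--         return {}
--
--     categories = {
--         "informational": [],
--         "commercial": [],
--         "navigational": []
--     }
--
--     info_indicators = ["how", "what", "why", "guide", "tutorial", "tips", "learn"]
--     commercial_indicators = ["buy", "price", "cost", "review", "best", "top", "vs", "versus", "comparison"]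
--
--     for kw in keywords:
--         if any(ind in kw for ind in info_indicators):
--             categories["informational"].append(kw)
--         elif any(ind in kw for ind in commercial_indicators):
--             categories["commercial"].append(kw)
--         else:
--             categories["navigational"].append(kw)
--
--     return categories
-- ===== SOURCE B (Python) =====
-- def categorize_keywords(keywords):
--     """Categorise keywords by intent via three independent filtering passes."""
--     if not keywords:
--         return {}
--
--     info_indicators = ["how", "what", "why", "guide", "tutorial", "tips", "learn"]
--     commercial_indicators = ["buy", "price", "cost", "review", "best", "top", "vs", "versus", "comparison"]
--
--     def is_info(kw):
--         return any(ind in kw for ind in info_indicators)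
--
--     def is_comm(kw):
--         return any(ind in kw for ind in commercial_indicators)
--
--     return {
--         "informational": [kw for kw in keywords if is_info(kw)],
--         "commercial": [kw for kw in keywords if not is_info(kw) and is_comm(kw)],
--         "navigational": [kw for kw in keywords if not is_info(kw) and not is_comm(kw)],
--     }
-- ===== Notes on version B (the rewrite author's own statement) =====
-- stated objective: idiomatic
-- what changed: Replaces the single loop that dispatches each keyword into a mutable dict with three independent filtering passes (list comprehensions over helper predicates) assembled into the result dict.
import Mathlib
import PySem

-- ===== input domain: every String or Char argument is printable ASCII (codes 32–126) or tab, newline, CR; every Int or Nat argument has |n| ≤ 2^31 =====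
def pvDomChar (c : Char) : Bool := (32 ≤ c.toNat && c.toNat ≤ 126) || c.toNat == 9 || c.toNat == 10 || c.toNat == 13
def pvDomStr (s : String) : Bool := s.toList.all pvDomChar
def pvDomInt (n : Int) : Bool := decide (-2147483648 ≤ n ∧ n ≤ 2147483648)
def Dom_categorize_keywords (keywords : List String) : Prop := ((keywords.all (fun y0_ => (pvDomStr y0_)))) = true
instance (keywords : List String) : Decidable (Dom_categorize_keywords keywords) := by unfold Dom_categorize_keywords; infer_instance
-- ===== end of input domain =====

-- B restates A's single dispatch loop as three independent filtering passes (idiomatic decomposition; same cost).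

-- ===== PORT A =====
def ckInfoIndicators : List String := ["how", "what", "why", "guide", "tutorial", "tips", "learn"]
def ckCommercialIndicators : List String := ["buy", "price", "cost", "review", "best", "top", "vs", "versus", "comparison"]

-- one iteration of A's for-loop: dispatch kw into the categories dict
def ckStep (d : PySem.Dict String (List String)) (kw : String) : PySem.Dict String (List String) :=
  if ckInfoIndicators.any (fun ind => PySem.Str.isIn ind kw) then
    d.modify "informational" [] (fun l => l ++ [kw])
  else if ckCommercialIndicators.any (fun ind => PySem.Str.isIn ind kw) then
    d.modify "commercial" [] (fun l => l ++ [kw])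
  else
    d.modify "navigational" [] (fun l => l ++ [kw])

def categorize_keywords (keywords : List String) : List (String × List String) :=
  if keywords = [] then []
  else
    (keywords.foldl ckStep
      (PySem.Dict.mk [("informational", []), ("commercial", []), ("navigational", [])])).items

-- ===== PORT B =====
def ckIsInfo (kw : String) : Bool :=
  ckInfoIndicators.any (fun ind => PySem.Str.isIn ind kw)

def ckIsComm (kw : String) : Bool :=
  ckCommercialIndicators.any (fun ind => PySem.Str.isIn ind kw)

def categorize_keywords_alt (keywords : List String) : List (String × List String) :=
  if keywords = [] then []
  else
    [("informational", keywords.filter ckIsInfo),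
     ("commercial", keywords.filter (fun kw => !ckIsInfo kw && ckIsComm kw)),
     ("navigational", keywords.filter (fun kw => !ckIsInfo kw && !ckIsComm kw))]

-- ===== PRECONDITION & SPEC =====
def Spec_categorize_keywords (keywords : List String) (out : List (String × List String)) : Prop := out = categorize_keywords_alt keywords
instance (keywords : List String) (out : List (String × List String)) : Decidable (Spec_categorize_keywords keywords out) := by unfold Spec_categorize_keywords; infer_instance

-- ===== CLAIM (what is proved, stated in full; the proofs are below) =====
def Claim_equal_categorize_keywords : Prop := ∀ (keywords : List String), Dom_categorize_keywords keywords → Spec_categorize_keywords keywords (categorize_keywords keywords)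

-- ===== LEMMAS AND PROOFS =====

theorem ckStep_eq (d : PySem.Dict String (List String)) (kw : String) :
    ckStep d kw =
      if ckIsInfo kw then d.modify "informational" [] (fun l => l ++ [kw])
      else if ckIsComm kw then d.modify "commercial" [] (fun l => l ++ [kw])
      else d.modify "navigational" [] (fun l => l ++ [kw]) := rfl

theorem ckLoop (kws : List String) (a b c : List String) :
    (kws.foldl ckStep (PySem.Dict.mk [("informational", a), ("commercial", b), ("navigational", c)])).items
    = [("informational", a ++ kws.filter ckIsInfo),
       ("commercial", b ++ kws.filter (fun kw => !ckIsInfo kw && ckIsComm kw)),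
       ("navigational", c ++ kws.filter (fun kw => !ckIsInfo kw && !ckIsComm kw))] := by
  induction kws generalizing a b c with
  | nil => simp [PySem.Dict.items]
  | cons kw rest ih =>
    simp only [List.foldl_cons, List.filter_cons, ckStep_eq]
    by_cases hi : ckIsInfo kw = true
    · rw [if_pos hi]
      have hstep : (PySem.Dict.mk [("informational", a), ("commercial", b), ("navigational", c)]).modify "informational" [] (fun l => l ++ [kw])
          = PySem.Dict.mk [("informational", a ++ [kw]), ("commercial", b), ("navigational", c)] := by
        simp [PySem.Dict.modify, PySem.Dict.contains, PySem.Dict.insert, PySem.Dict.getD, PySem.Dict.get?]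
      rw [hstep, ih]
      simp [hi]
    · rw [if_neg (by simp [hi])]
      by_cases hc : ckIsComm kw = true
      · rw [if_pos hc]
        have hstep : (PySem.Dict.mk [("informational", a), ("commercial", b), ("navigational", c)]).modify "commercial" [] (fun l => l ++ [kw])
            = PySem.Dict.mk [("informational", a), ("commercial", b ++ [kw]), ("navigational", c)] := by
          simp [PySem.Dict.modify, PySem.Dict.contains, PySem.Dict.insert, PySem.Dict.getD, PySem.Dict.get?]
        rw [hstep, ih]
        simp [hi, hc]
      · rw [if_neg (by simp [hc])]
        have hstep : (PySem.Dict.mk [("informational", a), ("commercial", b), ("navigational", c)]).modify "navigational" [] (fun l => l ++ [kw])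
            = PySem.Dict.mk [("informational", a), ("commercial", b), ("navigational", c ++ [kw])] := by
          simp [PySem.Dict.modify, PySem.Dict.contains, PySem.Dict.insert, PySem.Dict.getD, PySem.Dict.get?]
        rw [hstep, ih]
        simp [hi, hc]

-- ===== VERDICT (by name: the statement is the Claim_ definition above) =====
theorem categorize_keywords_spec : Claim_equal_categorize_keywords := by
  intro keywords _
  unfold Spec_categorize_keywords categorize_keywords categorize_keywords_alt
  by_cases h : keywords = []
  · simp [h]
  · rw [if_neg h, if_neg h]
    rw [ckLoop]
    simp
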